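-- pv_equiv track=rewrite | github.com/pmesgari/adventofcodde | 2024/day22.py | generate
-- ===== SOURCE A (Python) =====
-- def generate(start, n):
--     """Generate the nth secret number starting with start value"""
--     res = 0
--     def mix(secret, val):
--         return secret ^ val
--     def prune(val):
--         return val % 16777216
--     res = start
--     for _ in range(n):
--         res = prune(mix(res, res * 64))
--         res = prune(mix(res, res // 32))
--         res = prune(mix(res, res * 2048))
--
--     return res
-- ===== SOURCE B (Python) =====
-- def generate(start, n):
--     """Generate the nth secret number starting with start value"""
--     M = 16777216
--
--     def step(x):
--         x = (x ^ (x * 64)) % M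
--         x = (x ^ (x // 32)) % M
--         return (x ^ (x * 2048)) % M
--
--     def apply(t, x):
--         # xor of the table entries selected by the bits of x
--         if not t:
--             return 0
--         return (t[0] if x & 1 else 0) ^ apply(t[1:], x >> 1)
--
--     def compose(t2, t1):
--         return [apply(t2, c) for c in t1]
--
--     def powl(t, k):
--         if k == 0:
--             return [1 << i for i in range(24)]
--         r = powl(compose(t, t), k // 2)
--         return compose(r, t) if k % 2 else r
--
--     if n <= 0:
--         return start
--     base = [step(1 << i) for i in range(24)]
--     return apply(powl(base, n), start % M)
-- ===== Notes on version B (the rewrite author's own statement) =====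
-- stated objective: faster
-- what changed: One step of the PRNG is GF(2)-linear on 24-bit states, so B builds its 24x24 bit matrix (as a 24-entry table of column images) once and raises it to the n-th power by binary exponentiation instead of iterating the step n times.
import Mathlib
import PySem

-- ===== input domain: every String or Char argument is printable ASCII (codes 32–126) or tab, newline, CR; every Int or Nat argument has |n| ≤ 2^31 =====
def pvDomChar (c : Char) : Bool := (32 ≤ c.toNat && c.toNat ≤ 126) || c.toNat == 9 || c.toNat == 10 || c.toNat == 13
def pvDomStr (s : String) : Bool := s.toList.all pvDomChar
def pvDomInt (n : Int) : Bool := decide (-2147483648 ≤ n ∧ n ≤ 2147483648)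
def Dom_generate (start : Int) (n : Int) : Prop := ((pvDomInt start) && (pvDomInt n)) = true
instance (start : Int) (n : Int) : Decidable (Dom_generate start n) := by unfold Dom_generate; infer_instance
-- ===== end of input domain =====

-- B replaces A's n-fold xor-shift-mod loop by one GF(2) 24x24 bit-matrix built once and
-- raised to the n-th power by binary exponentiation (objective: faster, asymptotic).

-- ===== PORT A =====
def generate_mix (secret : Int) (val : Int) : Int := PySem.Int.bxor secret val

def generate_prune (val : Int) : Int := PySem.Int.mod val 16777216

def generate (start : Int) (n : Int) : Int :=
  (PySem.List.pyRange 0 n 1).foldl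
    (fun res _ =>
      let res1 := generate_prune (generate_mix res (res * 64))
      let res2 := generate_prune (generate_mix res1 (PySem.Int.floordiv res1 32))
      generate_prune (generate_mix res2 (res2 * 2048)))
    start

-- ===== PORT B =====
def generate_step (x : Int) : Int :=
  let x1 := PySem.Int.mod (PySem.Int.bxor x (x * 64)) 16777216
  let x2 := PySem.Int.mod (PySem.Int.bxor x1 (PySem.Int.floordiv x1 32)) 16777216
  PySem.Int.mod (PySem.Int.bxor x2 (x2 * 2048)) 16777216

-- apply(t, x): xor of the table entries selected by the bits of x
def generate_apply : List Int → Int → Int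
  | [], _ => 0
  | c :: t, x =>
      PySem.Int.bxor (if PySem.Int.band x 1 = 0 then 0 else c)
        (generate_apply t (x >>> (1 : Nat)))

def generate_compose (t2 t1 : List Int) : List Int := t1.map (fun c => generate_apply t2 c)

-- powl(t, k); the loop variable `i` of range(24) is nonnegative, so `i.toNat` is exact
def generate_powl (t : List Int) (k : Nat) : List Int :=
  if h : k = 0 then (PySem.List.pyRange 0 24 1).map (fun i => (1 : Int) <<< i.toNat)
  else
    let r := generate_powl (generate_compose t t) (k / 2)
    if k % 2 = 1 then generate_compose r t else r
termination_by k
decreasing_by exact Nat.div_lt_self (Nat.pos_of_ne_zero h) one_lt_two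

def generate_base : List Int :=
  (PySem.List.pyRange 0 24 1).map (fun i => generate_step ((1 : Int) <<< i.toNat))

def generate_alt (start : Int) (n : Int) : Int :=
  if n ≤ 0 then start
  else generate_apply (generate_powl generate_base n.toNat) (PySem.Int.mod start 16777216)

-- ===== PRECONDITION & SPEC =====
def Spec_generate (start : Int) (n : Int) (out : Int) : Prop := out = generate_alt start n
instance (start : Int) (n : Int) (out : Int) : Decidable (Spec_generate start n out) := by unfold Spec_generate; infer_instance

-- ===== CLAIM (what is proved, stated in full; the proofs are below) =====
def Claim_equal_generate : Prop := ∀ (start : Int) (n : Int), Dom_generate start n → Spec_generate start n (generate start n)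

-- ===== LEMMAS AND PROOFS =====

-- Nat-level model of one PRNG step (the state is a 24-bit number).
def stepN (s : Nat) : Nat :=
  let a := (s ^^^ s * 64) % 16777216
  let b := (a ^^^ a / 32) % 16777216
  (b ^^^ b * 2048) % 16777216

def applyN : List Nat → Nat → Nat
  | [], _ => 0
  | c :: t, x => (if x &&& 1 = 0 then 0 else c) ^^^ applyN t (x >>> 1)

def composeN (t2 t1 : List Nat) : List Nat := t1.map (fun c => applyN t2 c)

def idN : List Nat := (List.range 24).map (fun i => 2 ^ i)

def powN (t : List Nat) (k : Nat) : List Nat :=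
  if h : k = 0 then idN
  else
    let r := powN (composeN t t) (k / 2)
    if k % 2 = 1 then composeN r t else r
termination_by k
decreasing_by exact Nat.div_lt_self (Nat.pos_of_ne_zero h) one_lt_two

def baseN : List Nat := (List.range 24).map (fun i => stepN (2 ^ i))

-- a table represents a linear map f when its i-th entry is f applied to the i-th basis vector
def reprT (t : List Nat) (f : Nat → Nat) : Prop := t = (List.range 24).map fun i => f (2 ^ i)

def GoodF (f : Nat → Nat) : Prop :=
  (∀ a b, f (a ^^^ b) = f a ^^^ f b) ∧ (∀ x, x < 2 ^ 24 → f x < 2 ^ 24)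

lemma xor_rec (a b : Nat) : a ^^^ b = 2 * (a / 2 ^^^ b / 2) + (a % 2 ^^^ b % 2) := by
  have h1 : (a ^^^ b) / 2 = a / 2 ^^^ b / 2 := by
    simpa using Nat.xor_div_two_pow (n := 1) (a := a) (b := b)
  have h2 : (a ^^^ b) % 2 = a % 2 ^^^ b % 2 := by
    simpa using Nat.xor_mod_two_pow (n := 1) (a := a) (b := b)
  conv_lhs => rw [← Nat.div_add_mod (a ^^^ b) 2]
  rw [h1, h2]

lemma compl_xor (k r : Nat) (h : r < 2 ^ k) : (2 ^ k - 1) ^^^ r = 2 ^ k - 1 - r := by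
  induction k generalizing r with
  | zero => interval_cases r; decide
  | succ k ih =>
    have hp : (1:Nat) ≤ 2 ^ k := Nat.one_le_two_pow
    have hm2 : (2 ^ (k+1) - 1 : Nat) / 2 = 2 ^ k - 1 := by omega
    have hmm : (2 ^ (k+1) - 1 : Nat) % 2 = 1 := by
      have : (2:Nat) ^ (k+1) = 2 * 2 ^ k := by ring
      omega
    have hr2 : r / 2 < 2 ^ k := by
      have : (2:Nat) ^ (k+1) = 2 * 2 ^ k := by ring
      omega
    have := ih (r / 2) hr2
    rw [xor_rec, hm2, hmm, this]
    have hb : (1 ^^^ r % 2) = 1 - r % 2 := by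
      have : r % 2 = 0 ∨ r % 2 = 1 := by omega
      rcases this with h' | h' <;> rw [h'] <;> decide
    rw [hb]
    have : (2:Nat) ^ (k+1) = 2 * 2 ^ k := by ring
    omega

lemma dsum (x : Nat) : x % 2 ^^^ 2 * (x / 2) = x := by
  rw [xor_rec]
  have h1 : x % 2 / 2 = 0 := by omega
  have h2 : 2 * (x / 2) / 2 = x / 2 := by omega
  have h3 : 2 * (x / 2) % 2 = 0 := by omega
  have h4 : x % 2 % 2 = x % 2 := by omega
  rw [h1, h2, h3, h4]
  simp
  omega

lemma mul2_xor (a b : Nat) : 2 * (a ^^^ b) = 2 * a ^^^ 2 * b := by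
  have := Nat.shiftLeft_xor_distrib (a := a) (b := b) (i := 1)
  simpa [Nat.shiftLeft_eq, Nat.mul_comm] using this

lemma mul64_xor (a b : Nat) : (a ^^^ b) * 64 = a * 64 ^^^ b * 64 := by
  have := Nat.shiftLeft_xor_distrib (a := a) (b := b) (i := 6)
  simpa [Nat.shiftLeft_eq, show (2:Nat)^6 = 64 from rfl] using this

lemma mul2048_xor (a b : Nat) : (a ^^^ b) * 2048 = a * 2048 ^^^ b * 2048 := by
  have := Nat.shiftLeft_xor_distrib (a := a) (b := b) (i := 11)
  simpa [Nat.shiftLeft_eq, show (2:Nat)^11 = 2048 from rfl] using this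

lemma xor_modM (a b : Nat) : (a ^^^ b) % 16777216 = a % 16777216 ^^^ b % 16777216 := by
  have := Nat.xor_mod_two_pow (n := 24) (a := a) (b := b)
  norm_num at this
  exact this

lemma neg_emod (n : Nat) : ((-(n:Int) - 1) % 16777216) = ((16777215 - n % 16777216 : Nat) : Int) := by
  omega

lemma toNat_emod (n : Nat) : (((n:Int)) % 16777216).toNat = n % 16777216 := by omega

lemma complM (r : Nat) (h : r < 16777216) : 16777215 ^^^ r = 16777215 - r := by
  have := compl_xor 24 r (by norm_num; omega)
  norm_num at this
  exact this

lemma xor_ltM (a b : Nat) (ha : a < 16777216) (hb : b < 16777216) : a ^^^ b < 16777216 := by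
  have := Nat.xor_lt_two_pow (n := 24) (by norm_num; omega : a < 2^24) (by norm_num; omega : b < 2^24)
  norm_num at this; exact this

lemma mask_xor_left (a r : Nat) (hr : r < 16777216) :
    (16777215 - r) ^^^ a % 16777216 = 16777215 - (r ^^^ a % 16777216) := by
  rw [← complM r hr, ← complM (r ^^^ a % 16777216) (xor_ltM _ _ hr (by omega)), Nat.xor_assoc]

lemma bxor_modM (x y : Int) :
    PySem.Int.bxor x y % 16777216 =
      (((x % 16777216).toNat ^^^ (y % 16777216).toNat : Nat) : Int) := by
  unfold PySem.Int.bxor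
  split_ifs with hx hy hy
  · obtain ⟨a, rfl⟩ := Int.eq_ofNat_of_zero_le hx
    obtain ⟨b, rfl⟩ := Int.eq_ofNat_of_zero_le hy
    rw [Int.toNat_natCast, Int.toNat_natCast, toNat_emod, toNat_emod, ← xor_modM]
    omega
  · obtain ⟨a, rfl⟩ := Int.eq_ofNat_of_zero_le hx
    obtain ⟨b, rfl⟩ : ∃ b : Nat, y = -(b:Int) - 1 := ⟨(-y-1).toNat, by omega⟩
    have e2 : (-(-(b:Int) - 1) - 1).toNat = b := by omega
    have e3 : ((-(b:Int) - 1) % 16777216).toNat = 16777215 - b % 16777216 := by omega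
    rw [Int.toNat_natCast, e2, neg_emod, toNat_emod, e3]
    refine congrArg _ ?_
    rw [Nat.xor_comm (a % 16777216) (16777215 - b % 16777216),
      mask_xor_left a (b % 16777216) (by omega), xor_modM, Nat.xor_comm (b % 16777216)]
  · obtain ⟨b, rfl⟩ := Int.eq_ofNat_of_zero_le hy
    obtain ⟨a, rfl⟩ : ∃ a : Nat, x = -(a:Int) - 1 := ⟨(-x-1).toNat, by omega⟩
    have e2 : (-(-(a:Int) - 1) - 1).toNat = a := by omega
    have e3 : ((-(a:Int) - 1) % 16777216).toNat = 16777215 - a % 16777216 := by omega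
    rw [Int.toNat_natCast, e2, neg_emod, toNat_emod, e3]
    refine congrArg _ ?_
    rw [mask_xor_left b (a % 16777216) (by omega), xor_modM]
  · obtain ⟨a, rfl⟩ : ∃ a : Nat, x = -(a:Int) - 1 := ⟨(-x-1).toNat, by omega⟩
    obtain ⟨b, rfl⟩ : ∃ b : Nat, y = -(b:Int) - 1 := ⟨(-y-1).toNat, by omega⟩
    have e2a : (-(-(a:Int) - 1) - 1).toNat = a := by omega
    have e2b : (-(-(b:Int) - 1) - 1).toNat = b := by omega
    have e3a : ((-(a:Int) - 1) % 16777216).toNat = 16777215 - a % 16777216 := by omega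
    have e3b : ((-(b:Int) - 1) % 16777216).toNat = 16777215 - b % 16777216 := by omega
    rw [e2a, e2b, e3a, e3b]
    have e : (16777215 - a % 16777216) ^^^ (16777215 - b % 16777216)
        = a % 16777216 ^^^ b % 16777216 := by
      rw [← complM (a % 16777216) (by omega), ← complM (b % 16777216) (by omega)]
      simp [Nat.xor_comm, Nat.xor_left_comm, Nat.xor_xor_cancel_left]
    rw [e, ← xor_modM]
    omega

lemma f_zero {f : Nat → Nat} (hf : ∀ a b, f (a ^^^ b) = f a ^^^ f b) : f 0 = 0 := by
  have h := hf 0 0; simp at h; omega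

lemma div32_xor (a b : Nat) : (a ^^^ b) / 32 = a / 32 ^^^ b / 32 := by
  simpa [show (2:Nat)^5 = 32 from rfl] using Nat.xor_div_two_pow (n := 5) (a := a) (b := b)

lemma opA_lin (a b : Nat) : ((a ^^^ b) ^^^ (a ^^^ b) * 64) % 16777216
    = ((a ^^^ a * 64) % 16777216) ^^^ ((b ^^^ b * 64) % 16777216) := by
  rw [mul64_xor, show a ^^^ b ^^^ (a * 64 ^^^ b * 64) = (a ^^^ a * 64) ^^^ (b ^^^ b * 64) by
    simp [Nat.xor_comm, Nat.xor_left_comm, Nat.xor_assoc], xor_modM]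

lemma opB_lin (a b : Nat) : ((a ^^^ b) ^^^ (a ^^^ b) / 32) % 16777216
    = ((a ^^^ a / 32) % 16777216) ^^^ ((b ^^^ b / 32) % 16777216) := by
  rw [div32_xor, show a ^^^ b ^^^ (a / 32 ^^^ b / 32) = (a ^^^ a / 32) ^^^ (b ^^^ b / 32) by
    simp [Nat.xor_comm, Nat.xor_left_comm, Nat.xor_assoc], xor_modM]

lemma opC_lin (a b : Nat) : ((a ^^^ b) ^^^ (a ^^^ b) * 2048) % 16777216
    = ((a ^^^ a * 2048) % 16777216) ^^^ ((b ^^^ b * 2048) % 16777216) := by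
  rw [mul2048_xor, show a ^^^ b ^^^ (a * 2048 ^^^ b * 2048) = (a ^^^ a * 2048) ^^^ (b ^^^ b * 2048) by
    simp [Nat.xor_comm, Nat.xor_left_comm, Nat.xor_assoc], xor_modM]

lemma stepN_lin (a b : Nat) : stepN (a ^^^ b) = stepN a ^^^ stepN b := by
  show ((((a ^^^ b) ^^^ (a ^^^ b) * 64) % 16777216 ^^^ ((a ^^^ b) ^^^ (a ^^^ b) * 64) % 16777216 / 32) % 16777216 ^^^ _) % 16777216 = _
  rw [opA_lin, opB_lin, opC_lin]
  rfl

lemma stepN_lt (s : Nat) : stepN s < 2 ^ 24 := by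
  unfold stepN; norm_num; omega

lemma good_step : GoodF stepN := ⟨stepN_lin, fun x _ => stepN_lt x⟩

lemma good_iter {f : Nat → Nat} (hf : GoodF f) (m : Nat) : GoodF f^[m] := by
  induction m with
  | zero => exact ⟨fun a b => rfl, fun x hx => by simpa using hx⟩
  | succ m ih =>
    refine ⟨fun a b => ?_, fun x hx => ?_⟩
    · rw [Function.iterate_succ_apply', Function.iterate_succ_apply',
        Function.iterate_succ_apply', ih.1, hf.1]
    · rw [Function.iterate_succ_apply']
      exact hf.2 _ (ih.2 x hx)

lemma applyN_lin_repr (f : Nat → Nat) (hlin : ∀ a b, f (a ^^^ b) = f a ^^^ f b) :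
    ∀ (m x : Nat), x < 2 ^ m →
      applyN ((List.range m).map fun i => f (2 ^ i)) x = f x := by
  intro m
  induction m generalizing f with
  | zero =>
    intro x hx
    interval_cases x
    simp [applyN, f_zero hlin]
  | succ m ih =>
    intro x hx
    rw [List.range_succ_eq_map, List.map_cons, List.map_map]
    have hmap : (List.map ((fun i => f (2 ^ i)) ∘ (fun i => i + 1)) (List.range m)) =
        (List.range m).map fun i => f (2 * 2 ^ i) := by
      refine List.map_congr_left (fun i _ => ?_)
      simp [Function.comp, pow_succ]
      ring_nf
    rw [hmap]
    have hg : ∀ a b, (fun y => f (2 * y)) (a ^^^ b) = (fun y => f (2 * y)) a ^^^ (fun y => f (2 * y)) b := by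
      intro a b
      simp only []
      rw [mul2_xor, hlin]
    have hx2 : x >>> 1 < 2 ^ m := by
      rw [Nat.shiftRight_one]
      have : (2:Nat) ^ (m+1) = 2 * 2 ^ m := by ring
      omega
    have hrec := ih (fun y => f (2 * y)) hg (x >>> 1) hx2
    simp only [] at hrec
    show applyN (f (2^0) :: _) x = f x
    rw [applyN, hrec]
    simp only [Nat.shiftRight_one]
    have hfx : f x = f (x % 2) ^^^ f (2 * (x / 2)) := by rw [← hlin, dsum]
    rw [hfx, Nat.and_one_is_mod]
    by_cases h2 : x % 2 = 0
    · rw [if_pos h2, h2, f_zero hlin]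
    · have h1 : x % 2 = 1 := by omega
      rw [if_neg h2, h1]
      norm_num

lemma repr_compose {t1 t2 : List Nat} {f1 f2 : Nat → Nat}
    (hf2 : ∀ a b, f2 (a ^^^ b) = f2 a ^^^ f2 b) (hf1 : ∀ x, x < 2 ^ 24 → f1 x < 2 ^ 24)
    (h1 : reprT t1 f1) (h2 : reprT t2 f2) : reprT (composeN t2 t1) (f2 ∘ f1) := by
  unfold reprT composeN at *
  subst h1 h2
  rw [List.map_map]
  refine List.map_congr_left (fun i hi => ?_)
  have hi24 : i < 24 := List.mem_range.mp hi
  have hlt : f1 (2 ^ i) < 2 ^ 24 := hf1 _ (Nat.pow_lt_pow_right (by norm_num) hi24)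
  exact applyN_lin_repr f2 hf2 24 _ hlt

lemma pow_repr : ∀ (k : Nat) (t : List Nat) (f : Nat → Nat),
    GoodF f → reprT t f → reprT (powN t k) f^[k] := by
  intro k
  induction k using Nat.strong_induction_on with
  | _ k ih =>
    intro t f hf ht
    rw [powN]
    by_cases hk : k = 0
    · subst hk
      simp [reprT, idN]
    · rw [dif_neg hk]
      have hcc : reprT (composeN t t) (f ∘ f) := repr_compose hf.1 hf.2 ht ht
      have hgcc : GoodF (f ∘ f) := by
        refine ⟨fun a b => ?_, fun x hx => hf.2 _ (hf.2 _ hx)⟩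
        simp [Function.comp, hf.1]
      have hr := ih (k / 2) (Nat.div_lt_self (Nat.pos_of_ne_zero hk) one_lt_two) _ _ hgcc hcc
      have hff : (f ∘ f)^[k / 2] = f^[2 * (k / 2)] := by
        have h2 : f ∘ f = f^[2] := by
          funext x; simp [Function.iterate_succ_apply']
        rw [h2, ← Function.iterate_mul]
      rw [hff] at hr
      by_cases hodd : k % 2 = 1
      · rw [if_pos hodd]
        have := repr_compose ((good_iter hf (2 * (k/2))).1) hf.2 ht hr
        have hk' : (2 * (k / 2)).succ = k := by omega
        rwa [← Function.iterate_succ, hk'] at this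
      · rw [if_neg hodd]
        have hk' : 2 * (k / 2) = k := by omega
        rwa [hk'] at hr

lemma foldl_const {α : Type} (g : α → α) : ∀ (l : List Int) (init : α),
    l.foldl (fun r _ => g r) init = g^[l.length] init := by
  intro l
  induction l with
  | nil => intro init; simp
  | cons a l ih =>
    intro init
    simp [List.foldl_cons, ih, Function.iterate_succ_apply]

lemma hmodM (a : Int) : PySem.Int.mod a 16777216 = a % 16777216 :=
  PySem.Int.mod_eq_emod_of_pos (by norm_num)

lemma bxor_natmod (u v : Nat) :
    PySem.Int.bxor ((u : Nat) : Int) ((v : Nat) : Int) % 16777216 = (((u ^^^ v) % 16777216 : Nat) : Int) := by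
  rw [bxor_modM, toNat_emod, toNat_emod, ← xor_modM]

lemma stepI_eq (x : Int) : generate_step x = ((stepN ((x % 16777216).toNat) : Nat) : Int) := by
  unfold generate_step stepN
  simp only [hmodM]
  set s := (x % 16777216).toNat with hs
  have hsM : s < 16777216 := by omega
  have h64 : x * 64 % 16777216 = (((s * 64) % 16777216 : Nat) : Int) := by
    rw [Int.mul_emod, show (64:Int) % 16777216 = 64 by norm_num,
      show x % 16777216 = ((s : Nat) : Int) by omega]
    push_cast
    omega
  have h1 : PySem.Int.bxor x (x * 64) % 16777216 = (((s ^^^ s * 64) % 16777216 : Nat) : Int) := by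
    rw [bxor_modM, h64, Int.toNat_natCast, ← hs,
      show (s ^^^ s * 64) % 16777216 = s ^^^ s * 64 % 16777216 by
        rw [xor_modM, Nat.mod_eq_of_lt hsM]]
  rw [h1]
  set a := (s ^^^ s * 64) % 16777216 with ha
  have haM : a < 16777216 := by omega
  have hdiv : PySem.Int.floordiv ((a : Nat) : Int) 32 = (((a / 32 : Nat)) : Int) := by
    exact_mod_cast PySem.Int.floordiv_natCast a 32
  rw [hdiv, bxor_natmod,
    show (a ^^^ a / 32) % 16777216 = a ^^^ a / 32 by
      rw [xor_modM, Nat.mod_eq_of_lt haM, Nat.mod_eq_of_lt (show a / 32 < 16777216 by omega)]]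
  set b := a ^^^ a / 32 with hb
  have hbM : b < 16777216 := xor_ltM _ _ haM (by omega)
  have h2048 : ((b : Nat) : Int) * 2048 = (((b * 2048 : Nat)) : Int) := by push_cast; ring
  rw [h2048, bxor_natmod]

lemma stepN_ltM (s : Nat) : stepN s < 16777216 := by
  have := stepN_lt s; omega

lemma stepI_iter (m : Nat) : ∀ x : Int,
    generate_step^[m + 1] x = ((stepN^[m + 1] ((x % 16777216).toNat) : Nat) : Int) := by
  induction m with
  | zero => intro x; simpa using stepI_eq x
  | succ m ih =>
    intro x
    rw [Function.iterate_succ_apply, Function.iterate_succ_apply (f := stepN)]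
    rw [stepI_eq x, ih]
    rw [toNat_emod, Nat.mod_eq_of_lt (stepN_ltM _)]

lemma generate_eq (start n : Int) (hn : 0 < n) :
    generate start n = ((stepN^[n.toNat] ((start % 16777216).toNat) : Nat) : Int) := by
  have hfold : generate start n = generate_step^[(PySem.List.pyRange 0 n 1).length] start := by
    rw [generate]
    exact foldl_const generate_step _ _
  obtain ⟨m, hm⟩ : ∃ m, n.toNat = m + 1 := ⟨n.toNat - 1, by omega⟩
  rw [hfold, PySem.List.length_pyRange_one, show (n - 0).toNat = n.toNat by omega, hm,
    stepI_iter]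
lemma apply_bridge (t : List Nat) : ∀ x : Nat,
    generate_apply (t.map (Nat.cast : Nat → Int)) (x : Int) = ((applyN t x : Nat) : Int) := by
  induction t with
  | nil => intro x; simp [generate_apply, applyN]
  | cons c t ih =>
    intro x
    rw [List.map_cons, generate_apply, applyN]
    have hband : PySem.Int.band ((x : Nat) : Int) 1 = (((x &&& 1 : Nat)) : Int) := by
      exact_mod_cast PySem.Int.band_natCast x 1
    have hshift : ((x : Nat) : Int) >>> (1 : Nat) = (((x >>> 1 : Nat)) : Int) := rfl
    rw [hband, hshift, ih]
    by_cases h : x &&& 1 = 0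
    · rw [if_pos (by exact_mod_cast h), if_pos h]
      exact_mod_cast PySem.Int.bxor_natCast 0 (applyN t (x >>> 1))
    · rw [if_neg (by exact_mod_cast h), if_neg h]
      exact_mod_cast PySem.Int.bxor_natCast c (applyN t (x >>> 1))

lemma compose_bridge (t2 t1 : List Nat) :
    generate_compose (t2.map (Nat.cast : Nat → Int)) (t1.map (Nat.cast : Nat → Int)) =
      (composeN t2 t1).map (Nat.cast : Nat → Int) := by
  unfold generate_compose composeN
  rw [List.map_map, List.map_map]
  exact List.map_congr_left (fun c _ => apply_bridge t2 c)

lemma idT_bridge :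
    (PySem.List.pyRange 0 24 1).map (fun i => (1 : Int) <<< i.toNat) =
      idN.map (Nat.cast : Nat → Int) := by decide

lemma base_bridge : generate_base = baseN.map (Nat.cast : Nat → Int) := by decide

lemma powl_bridge : ∀ (k : Nat) (t : List Nat),
    generate_powl (t.map (Nat.cast : Nat → Int)) k = (powN t k).map (Nat.cast : Nat → Int) := by
  intro k
  induction k using Nat.strong_induction_on with
  | _ k ih =>
    intro t
    rw [generate_powl, powN]
    by_cases hk : k = 0
    · rw [dif_pos hk, dif_pos hk]
      exact idT_bridge
    · rw [dif_neg hk, dif_neg hk]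
      simp only []
      rw [compose_bridge, ih (k / 2) (Nat.div_lt_self (Nat.pos_of_ne_zero hk) one_lt_two)]
      by_cases hodd : k % 2 = 1
      · rw [if_pos hodd, if_pos hodd, compose_bridge]
      · rw [if_neg hodd, if_neg hodd]

-- ===== VERDICT (by name: the statement is the Claim_ definition above) =====
theorem generate_spec : Claim_equal_generate := by
  intro start n _
  unfold Spec_generate generate_alt
  by_cases hn : n ≤ 0
  · rw [if_pos hn, generate, PySem.List.pyRange_one_eq_nil (by omega)]
    rfl
  · rw [if_neg hn]
    have hpos : 0 < n := by omega
    set s0 := (start % 16777216).toNat with hs0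
    have hs0M : s0 < 2 ^ 24 := by norm_num; omega
    have hmod : PySem.Int.mod start 16777216 = ((s0 : Nat) : Int) := by
      rw [hmodM]; omega
    rw [generate_eq start n hpos, hmod, base_bridge, powl_bridge, apply_bridge]
    have hrepr := pow_repr n.toNat baseN stepN good_step (by rfl)
    unfold reprT at hrepr
    rw [hrepr, applyN_lin_repr _ (good_iter good_step n.toNat).1 24 s0 hs0M]
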